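-- pv_equiv track=rewrite | github.com/Charlo-tech/May-DSA-AH | 10-May-2023/efficiency.py | min_task_cost
-- ===== SOURCE A (Python) =====
-- def min_task_cost(efficiency):
--     min_cost = float('inf')
--     n = len(efficiency)
--     for i in range(n):
--         # exclude worker i and form pairs with remaining workers
--         remaining = efficiency[:i] + efficiency[i+1:]
--         remaining.sort()
--         cost = sum(abs(remaining[j] - remaining[j+1]) for j in range(0, n-2, 2))
--         if cost < min_cost:
--             min_cost = cost
--     return min_cost
-- ===== SOURCE B (Python) =====
-- def min_task_cost(efficiency):
--     # Sort once; answer each "exclude worker i" query in O(1) via prefix/suffix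
--     # adjacent-pairing sums over the single sorted list (A re-sorts per exclusion).
--     n = len(efficiency)
--     s = sorted(efficiency)
--     # L = largest odd prefix length; the element s[L:] (present only when n is even)
--     # is the one A's pairing always leaves unpaired.
--     L = n if n % 2 == 1 else n - 1
--     # pre[k] (k even): cost of pairing s[0:k] into adjacent pairs
--     pre = [0] * (n + 2)
--     for k in range(2, L + 1, 2):
--         pre[k] = pre[k - 2] + (s[k - 1] - s[k - 2])
--     # suf[k] (k odd): cost of pairing s[k:L] into adjacent pairs
--     suf = [0] * (n + 3)
--     for k in range(L - 2, 0, -2):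
--         suf[k] = suf[k + 2] + (s[k + 1] - s[k])
--     best = None
--     for i in range(n):
--         if i >= L:
--             c = pre[L - 1]
--         elif i % 2 == 0:
--             c = pre[i] + suf[i + 1]
--         else:
--             c = pre[i - 1] + (s[i + 1] - s[i - 1]) + suf[i + 2]
--         if best is None or c < best:
--             best = c
--     if best is None:
--         raise ValueError("min_task_cost() arg is an empty sequence")
--     return best
-- ===== Notes on version B (the rewrite author's own statement) =====
-- stated objective: faster
-- what changed: A re-sorts the remaining list and re-sums adjacent pairs for every excluded worker; B sorts once and precomputes prefix/suffix adjacent-pairing sums over the single sorted list, answering each exclusion in O(1).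
-- outside the precondition, e.g. on min_task_cost([]): A returns inf, B raises ValueError
import Mathlib
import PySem

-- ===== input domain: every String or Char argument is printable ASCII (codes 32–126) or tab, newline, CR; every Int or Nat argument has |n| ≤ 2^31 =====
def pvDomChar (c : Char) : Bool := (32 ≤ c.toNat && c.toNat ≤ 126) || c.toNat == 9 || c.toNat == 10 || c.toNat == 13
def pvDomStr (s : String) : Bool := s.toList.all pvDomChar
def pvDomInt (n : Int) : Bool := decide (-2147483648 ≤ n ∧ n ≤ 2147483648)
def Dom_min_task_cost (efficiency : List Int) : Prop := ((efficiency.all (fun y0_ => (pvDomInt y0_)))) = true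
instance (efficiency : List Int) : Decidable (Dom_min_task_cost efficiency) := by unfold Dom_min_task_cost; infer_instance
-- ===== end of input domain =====

-- B sorts ONCE and precomputes prefix/suffix adjacent-pairing sums, answering each
-- exclusion in O(1), where A re-sorts the remaining workers for every exclusion (objective: faster).

-- ===== PORT A =====
def min_task_cost (efficiency : List Int) : Int :=
  let n : Int := PySem.List.len efficiency
  let r := (PySem.List.pyRange 0 n 1).foldl (fun (min_cost : Option Int) i =>
    -- remaining = efficiency[:i] + efficiency[i+1:]; remaining.sort()
    let remaining :=
      PySem.List.sorted
        (PySem.List.slice efficiency none (some i) ++ PySem.List.slice efficiency (some (i + 1)) none)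
        (fun x => x) false
    -- cost = sum(abs(remaining[j] - remaining[j+1]) for j in range(0, n-2, 2)); indices always in range
    let cost := (PySem.List.pyRange 0 (n - 2) 2).foldl
      (fun acc j => acc + |PySem.List.pyGetD remaining j 0 - PySem.List.pyGetD remaining (j + 1) 0|) 0
    match min_cost with
    | none => some cost
    | some m => if cost < m then some cost else some m) none
  -- min_cost is still float('inf') only for the empty list, which Pre_ excludes
  r.getD 0

-- ===== PORT B =====
-- pre[k] of Source B: memo array of this recurrence (entries are only read at k ≤ L)
def altPre (s : List Int) : Nat → Int
  | 0 => 0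
  | 1 => 0
  | (k + 2) => altPre s k + (s.getD (k + 1) 0 - s.getD k 0)

-- suf[k] of Source B: memo array of this recurrence (suf[k] = 0 for k ≥ L - 1)
def altSuf (s : List Int) (L : Nat) (k : Nat) : Int :=
  if k + 2 ≤ L then (s.getD (k + 1) 0 - s.getD k 0) + altSuf s L (k + 2) else 0
termination_by L - k

-- the body of Source B's query loop
def altCost (s : List Int) (L : Nat) (i : Nat) : Int :=
  if L ≤ i then altPre s (L - 1)
  else if i % 2 = 0 then altPre s i + altSuf s L (i + 1)
  else altPre s (i - 1) + (s.getD (i + 1) 0 - s.getD (i - 1) 0) + altSuf s L (i + 2)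

def min_task_cost_alt (efficiency : List Int) : Int :=
  let n := efficiency.length
  let s := PySem.List.sorted efficiency (fun x => x) false
  let L := if n % 2 = 1 then n else n - 1
  let best := (List.range n).foldl (fun (best : Option Int) i =>
    match best with
    | none => some (altCost s L i)
    | some m => if altCost s L i < m then some (altCost s L i) else some m) none
  -- best is still None only for the empty list, where Source B raises ValueError (excluded by Pre_)
  best.getD 0

-- ===== PRECONDITION & SPEC =====
-- Pre_ excludes only the empty list: there A returns float('inf') (not an int) and B raises ValueError.
def Pre_min_task_cost (efficiency : List Int) : Prop := efficiency ≠ []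
instance (efficiency : List Int) : Decidable (Pre_min_task_cost efficiency) := by
  unfold Pre_min_task_cost; infer_instance
def pvWitness_min_task_cost : List Int := [3, 1, 2]

def Spec_min_task_cost (efficiency : List Int) (out : Int) : Prop := out = min_task_cost_alt efficiency
instance (efficiency : List Int) (out : Int) : Decidable (Spec_min_task_cost efficiency out) := by
  unfold Spec_min_task_cost; infer_instance

-- ===== CLAIM (what is proved, stated in full; the proofs are below) =====
def Claim_equal_min_task_cost : Prop := ∀ (efficiency : List Int), Dom_min_task_cost efficiency → Pre_min_task_cost efficiency → Spec_min_task_cost efficiency (min_task_cost efficiency)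

-- ===== LEMMAS AND PROOFS =====

-- cost of pairing a list into adjacent pairs (greedy from the front; a trailing odd element is free)
def pairSum : List Int → Int
  | [] => 0
  | [_] => 0
  | x :: y :: t => (y - x) + pairSum t

theorem pairSum_append : ∀ (l m : List Int), l.length % 2 = 0 →
    pairSum (l ++ m) = pairSum l + pairSum m
  | [], m, _ => by simp [pairSum]
  | [x], m, h => by simp at h
  | x :: y :: t, m, h => by
      simp only [List.cons_append, pairSum]
      rw [pairSum_append t m (by simp only [List.length_cons] at h; omega)]
      ring

theorem pyGetD_cons_succ' (a : Int) (l : List Int) (j : Int) (hj : 0 ≤ j) (d : Int) :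
    PySem.List.pyGetD (a :: l) (j + 1) d = PySem.List.pyGetD l j d := by
  obtain ⟨m, rfl⟩ : ∃ m : Nat, j = (m : Int) := ⟨j.toNat, (Int.toNat_of_nonneg hj).symm⟩
  rw [show ((m : Int) + 1) = ((m + 1 : Nat) : Int) by push_cast; ring,
      PySem.List.pyGetD_natCast, PySem.List.pyGetD_natCast, List.getD_cons_succ]

theorem pyGetD_cons2 (a b : Int) (l : List Int) (j : Int) (hj : 0 ≤ j) (d : Int) :
    PySem.List.pyGetD (a :: b :: l) (j + 2) d = PySem.List.pyGetD l j d := by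
  rw [show j + 2 = (j + 1) + 1 by ring, pyGetD_cons_succ' a _ _ (by omega),
      pyGetD_cons_succ' b _ _ hj]

-- range(0, b, 2) peels its first element for b ≥ 1
theorem pyRange2_cons (b : Int) (hb : 1 ≤ b) :
    PySem.List.pyRange 0 b 2 = 0 :: (PySem.List.pyRange 0 (b - 2) 2).map (· + 2) := by
  rw [PySem.List.pyRange_of_pos 0 b (by norm_num), PySem.List.pyRange_of_pos 0 (b - 2) (by norm_num)]
  have hc : (if (0:Int) < b then ((b - 0 + 2 - 1) / 2).toNat else 0)
      = (if (0:Int) < b - 2 then ((b - 2 - 0 + 2 - 1) / 2).toNat else 0) + 1 := by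
    split <;> split <;> omega
  rw [hc, List.range_succ_eq_map]
  simp only [List.map_cons, List.map_map]
  refine congrArg₂ _ (by norm_num) (List.map_congr_left fun k _ => ?_)
  simp only [Function.comp_apply]
  push_cast
  ring

-- A's generator sum over range(0, len(r)-1, 2) is pairSum r, for r sorted
theorem sumA : ∀ (r : List Int), r.Pairwise (· ≤ ·) →
    ((PySem.List.pyRange 0 ((r.length : Int) - 1) 2).map
      (fun j => |PySem.List.pyGetD r j 0 - PySem.List.pyGetD r (j + 1) 0|)).sum = pairSum r
  | [], _ => by
      rw [PySem.List.pyRange_of_pos 0 _ (by norm_num)]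
      norm_num [pairSum]
  | [x], _ => by
      rw [PySem.List.pyRange_of_pos 0 _ (by norm_num)]
      norm_num [pairSum]
  | x :: y :: t, h => by
      have hxy : x ≤ y := (List.pairwise_cons.mp h).1 y (by simp)
      have ht : t.Pairwise (· ≤ ·) := (List.pairwise_cons.mp (List.pairwise_cons.mp h).2).2
      have hb : (1:Int) ≤ (((x :: y :: t).length : Int) - 1) := by
        simp only [List.length_cons]; push_cast; omega
      rw [pyRange2_cons _ hb]
      simp only [List.map_cons, List.sum_cons, List.map_map]
      have hhead : |PySem.List.pyGetD (x :: y :: t) 0 0 - PySem.List.pyGetD (x :: y :: t) (0 + 1) 0|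
          = y - x := by
        norm_num [PySem.List.pyGetD_zero_cons, PySem.List.pyGetD_ofNat']
        rw [abs_sub_comm, abs_of_nonneg (by omega)]
      have hbnd : (((x :: y :: t).length : Int) - 1) - 2 = ((t.length : Int) - 1) := by
        simp only [List.length_cons]; push_cast; ring
      have htail : ((PySem.List.pyRange 0 ((((x :: y :: t).length : Int) - 1) - 2) 2).map
            ((fun j => |PySem.List.pyGetD (x :: y :: t) j 0 - PySem.List.pyGetD (x :: y :: t) (j + 1) 0|) ∘ (· + 2))).sum
          = pairSum t := by
        rw [hbnd, ← sumA t ht]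
        refine congrArg _ (List.map_congr_left fun j hj => ?_)
        have h0 : 0 ≤ j :=
          ((PySem.List.mem_pyRange_iff_of_pos (by norm_num) j).mp hj).1
        simp only [Function.comp_apply]
        rw [show j + 2 + 1 = (j + 1) + 2 by ring, pyGetD_cons2 x y t j h0,
            pyGetD_cons2 x y t (j + 1) (by omega)]
      rw [hhead, htail]
      simp [pairSum]

theorem perm_eraseIdx_erase (l : List Int) (i : Nat) (h : i < l.length) :
    (l.eraseIdx i).Perm (l.erase l[i]) :=
  (List.erase_getElem h).symm

theorem sorted_eraseIdx (l : List Int) (i : Nat) (h : i < l.length) :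
    PySem.List.sorted (l.eraseIdx i) (fun x => x) false
      = (PySem.List.sorted l (fun x => x) false).erase l[i] := by
  apply List.Perm.eq_of_pairwise (le := (· ≤ ·))
  · exact fun a b _ _ hab hba => le_antisymm hab hba
  · simpa using PySem.List.sorted_pairwise (l.eraseIdx i) (fun x => x)
  · exact List.Pairwise.sublist List.erase_sublist
      (by simpa using PySem.List.sorted_pairwise l (fun x => x))
  · exact (PySem.List.sorted_perm _ _ _).trans
      ((perm_eraseIdx_erase l i h).trans ((PySem.List.sorted_perm l _ _).symm.erase _))

theorem eraseIdx_sorted_eq_erase (s : List Int) (j : Nat) (h : j < s.length)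
    (hs : s.Pairwise (· ≤ ·)) : s.eraseIdx j = s.erase s[j] := by
  apply List.Perm.eq_of_pairwise (le := (· ≤ ·))
  · exact fun a b _ _ hab hba => le_antisymm hab hba
  · exact List.Pairwise.sublist (List.eraseIdx_sublist s j) hs
  · exact List.Pairwise.sublist List.erase_sublist hs
  · exact perm_eraseIdx_erase s j h

theorem take_two_step (s : List Int) (k : Nat) (h : k + 2 ≤ s.length) :
    s.take (k + 2) = s.take k ++ [s[k]'(by omega), s[k+1]'(by omega)] := by
  have h1 : s.take (k + 1 + 1) = s.take (k + 1) ++ [s[k+1]'(by omega)] :=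
    List.take_succ_eq_append_getElem (by omega)
  have h2 : s.take (k + 1) = s.take k ++ [s[k]'(by omega)] :=
    List.take_succ_eq_append_getElem (by omega)
  rw [show k + 2 = k + 1 + 1 by ring, h1, h2, List.append_assoc]
  rfl

theorem pairSum_take (s : List Int) : ∀ (k : Nat), 2 ∣ k → k ≤ s.length →
    pairSum (s.take k) = altPre s k
  | 0, _, _ => by simp [pairSum, altPre]
  | 1, hk, _ => by omega
  | (k + 2), hk, hle => by
      rw [take_two_step s k hle, pairSum_append _ _ (by simp; omega),
          pairSum_take s k (by omega) (by omega)]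
      simp only [pairSum, altPre]
      rw [List.getD_eq_getElem s 0 (by omega : k + 1 < s.length),
          List.getD_eq_getElem s 0 (by omega : k < s.length)]
      ring

theorem pairSum_drop (s : List Int) (L : Nat) (hL : L % 2 = 1)
    (hLle : L ≤ s.length) (hn : s.length ≤ L + 1) :
    ∀ (k : Nat), k % 2 = 1 → pairSum (s.drop k) = altSuf s L k
  | k, hk => by
      rw [altSuf]
      split
      case isTrue h =>
        rw [List.drop_eq_getElem_cons (by omega : k < s.length),
            List.drop_eq_getElem_cons (by omega : k + 1 < s.length)]
        simp only [pairSum]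
        rw [pairSum_drop s L hL hLle hn (k + 2) (by omega),
            List.getD_eq_getElem s 0 (by omega : k + 1 < s.length),
            List.getD_eq_getElem s 0 (by omega : k < s.length)]
      case isFalse h =>
        -- here k ≥ L (k and L odd, k ≥ L - 1), so at most one element remains
        have hlen : (s.drop k).length ≤ 1 := by simp; omega
        cases hd : s.drop k with
        | nil => simp [pairSum]
        | cons a t2 =>
            cases t2 with
            | nil => simp [pairSum]
            | cons b t3 => rw [hd] at hlen; simp at hlen
  termination_by k => L - k

theorem pairSum_eraseIdx (s : List Int) (j : Nat) (hj : j < s.length) :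
    pairSum (s.eraseIdx j)
      = altCost s (if s.length % 2 = 1 then s.length else s.length - 1) j := by
  set n := s.length with hn
  set L := if n % 2 = 1 then n else n - 1 with hLdef
  have hL : L % 2 = 1 ∧ L ≤ n ∧ n ≤ L + 1 := by
    rw [hLdef]; split <;> omega
  rw [List.eraseIdx_eq_take_drop_succ, altCost]
  split
  case isTrue h =>
    -- j ≥ L: only possible when n is even and j = n - 1, the unpaired tail slot
    have hj' : j = n - 1 ∧ L = n - 1 := by omega
    have hdrop : s.drop (j + 1) = [] := by
      apply List.drop_eq_nil_of_le; omega
    rw [hdrop, List.append_nil,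
        show j = (L - 1) + 1 by omega,
        List.take_succ_eq_append_getElem (by omega : L - 1 < s.length),
        pairSum_append _ _ (by simp; omega),
        pairSum_take s (L - 1) (by omega) (by omega)]
    simp [pairSum]
  case isFalse h =>
    split
    case isTrue he =>
      rw [pairSum_append _ _ (by simp; omega),
          pairSum_take s j (by omega) (by omega),
          pairSum_drop s L hL.1 (by omega) (by omega) (j + 1) (by omega)]
    case isFalse ho =>
      obtain ⟨j', rfl⟩ : ∃ j', j = j' + 1 := ⟨j - 1, by omega⟩
      rw [List.take_succ_eq_append_getElem (by omega : j' < s.length),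
          List.append_assoc, List.singleton_append,
          pairSum_append _ _ (by simp; omega),
          pairSum_take s j' (by omega) (by omega),
          List.drop_eq_getElem_cons (by omega : j' + 1 + 1 < s.length)]
      simp only [pairSum]
      rw [pairSum_drop s L hL.1 (by omega) (by omega) (j' + 1 + 1 + 1) (by omega),
          List.getD_eq_getElem s 0 (by omega : j' + 1 + 1 < s.length),
          List.getD_eq_getElem s 0 (by omega : j' + 1 - 1 < s.length)]
      simp only [show j' + 1 - 1 = j' from rfl, show j' + 1 + 1 + 1 = j' + 1 + 2 from by omega]
      ring

-- the running-min loop with a None start is List.min? of the mapped values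
theorem foldl_optmin_aux (g : Nat → Int) : ∀ (l : List Nat) (m : Int),
    l.foldl (fun (acc : Option Int) i =>
        match acc with
        | none => some (g i)
        | some m => if g i < m then some (g i) else some m) (some m)
      = some ((l.map g).foldl min m)
  | [], m => rfl
  | a :: t, m => by
      simp only [List.foldl_cons, List.map_cons]
      rw [show (if g a < m then some (g a) else some m) = some (min m (g a)) by
        rw [min_def_lt' m (g a)]; split <;> rfl]
      exact foldl_optmin_aux g t (min m (g a))

theorem foldl_optmin (g : Nat → Int) (l : List Nat) :
    l.foldl (fun (acc : Option Int) i =>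
        match acc with
        | none => some (g i)
        | some m => if g i < m then some (g i) else some m) none
      = (l.map g).min? := by
  cases l with
  | nil => rfl
  | cons a t =>
      simp only [List.foldl_cons, List.map_cons, List.min?_cons']
      exact foldl_optmin_aux g t (g a)

theorem min?_congr_subset (l₁ l₂ : List Int) (h₁ : l₁ ⊆ l₂) (h₂ : l₂ ⊆ l₁) :
    l₁.min? = l₂.min? := by
  cases hm : l₁.min? with
  | none =>
      rw [List.min?_eq_none_iff] at hm
      subst hm
      rw [Eq.comm, List.min?_eq_none_iff]
      exact List.subset_nil.mp h₂
  | some m =>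
      rw [List.min?_eq_some_iff] at hm
      rw [Eq.comm, List.min?_eq_some_iff]
      exact ⟨h₁ hm.1, fun b hb => hm.2 b (h₂ hb)⟩

-- cost of A's i-th exclusion, expressed on the one sorted list
def gA (l : List Int) (i : Nat) : Int :=
  pairSum ((PySem.List.sorted l (fun x => x) false).erase (l.getD i 0))

-- cost of B's i-th exclusion
def gB (l : List Int) (i : Nat) : Int :=
  altCost (PySem.List.sorted l (fun x => x) false)
    (if l.length % 2 = 1 then l.length else l.length - 1) i

theorem portA_eq (l : List Int) :
    min_task_cost l = (((List.range l.length).map (gA l)).min?).getD 0 := by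
  unfold min_task_cost
  simp only [PySem.List.len_eq]
  rw [PySem.List.pyRange_zero_natCast, List.foldl_map]
  rw [PySem.List.foldl_congr_mem _ _
        (fun (acc : Option Int) i => match acc with
          | none => some (gA l i)
          | some m => if gA l i < m then some (gA l i) else some m) none ?_,
      foldl_optmin]
  intro acc i hi
  have hi' : i < l.length := List.mem_range.mp hi
  have hsl : (PySem.List.sorted l (fun x => x) false).length = l.length :=
    (PySem.List.sorted_perm l _ _).length_eq
  have hmem : l[i] ∈ PySem.List.sorted l (fun x => x) false :=
    (PySem.List.sorted_perm l _ _).mem_iff.mpr (l.getElem_mem hi')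
  have hlen_er : ((PySem.List.sorted l (fun x => x) false).erase l[i]).length
      = l.length - 1 := by rw [List.length_erase_of_mem hmem, hsl]
  simp only [PySem.List.slice_to_natCast,
    show ((i : Int) + 1) = ((i + 1 : Nat) : Int) by push_cast; ring,
    PySem.List.slice_from_natCast, ← List.eraseIdx_eq_take_drop_succ,
    sorted_eraseIdx l i hi', PySem.List.foldl_add]
  rw [show ((l.length : Int) - 2)
        = ((((PySem.List.sorted l (fun x => x) false).erase l[i]).length : Int) - 1) by
      rw [hlen_er]; push_cast [Nat.cast_sub (by omega : 1 ≤ l.length)]; ring]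
  rw [sumA _ (List.Pairwise.sublist List.erase_sublist
        (by simpa using PySem.List.sorted_pairwise l (fun x => x)))]
  have hga : gA l i = pairSum ((PySem.List.sorted l (fun x => x) false).erase l[i]) := by
    unfold gA; rw [List.getD_eq_getElem l 0 hi']
  rw [hga, zero_add]

theorem portB_eq (l : List Int) :
    min_task_cost_alt l = (((List.range l.length).map (gB l)).min?).getD 0 := by
  unfold min_task_cost_alt
  simp only []
  rw [foldl_optmin]
  rfl

theorem gB_eq (l : List Int) (j : Nat) (hj : j < l.length) :
    gB l j = pairSum ((PySem.List.sorted l (fun x => x) false).erase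
      ((PySem.List.sorted l (fun x => x) false).getD j 0)) := by
  have hsl : (PySem.List.sorted l (fun x => x) false).length = l.length :=
    (PySem.List.sorted_perm l _ _).length_eq
  have hj' : j < (PySem.List.sorted l (fun x => x) false).length := by omega
  have hsp : (PySem.List.sorted l (fun x => x) false).Pairwise (· ≤ ·) := by
    simpa using PySem.List.sorted_pairwise l (fun x => x)
  unfold gB
  rw [← hsl, ← pairSum_eraseIdx _ j hj', eraseIdx_sorted_eq_erase _ j hj' hsp,
      List.getD_eq_getElem _ 0 hj']

-- ===== VERDICT (by name: the statement is the Claim_ definition above) =====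
theorem min_task_cost_spec : Claim_equal_min_task_cost := by
  unfold Claim_equal_min_task_cost
  intro l _ _
  unfold Spec_min_task_cost
  rw [portA_eq, portB_eq]
  have hsl : (PySem.List.sorted l (fun x => x) false).length = l.length :=
    (PySem.List.sorted_perm l _ _).length_eq
  congr 1
  apply min?_congr_subset
  · intro x hx
    obtain ⟨i, hi, rfl⟩ := List.mem_map.mp hx
    have hi' : i < l.length := List.mem_range.mp hi
    have hv : l[i] ∈ PySem.List.sorted l (fun x => x) false :=
      (PySem.List.sorted_perm l _ _).mem_iff.mpr (l.getElem_mem hi')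
    obtain ⟨j, hj, hval⟩ := List.mem_iff_getElem.mp hv
    refine List.mem_map.mpr ⟨j, List.mem_range.mpr (by omega), ?_⟩
    rw [gB_eq l j (by omega)]
    unfold gA
    rw [List.getD_eq_getElem l 0 hi', List.getD_eq_getElem _ 0 hj, hval]
  · intro x hx
    obtain ⟨j, hj, rfl⟩ := List.mem_map.mp hx
    have hj' : j < (PySem.List.sorted l (fun x => x) false).length := by
      have := List.mem_range.mp hj; omega
    have hv : (PySem.List.sorted l (fun x => x) false)[j] ∈ l :=
      (PySem.List.sorted_perm l _ _).mem_iff.mp (List.getElem_mem hj')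
    obtain ⟨i, hi, hval⟩ := List.mem_iff_getElem.mp hv
    refine List.mem_map.mpr ⟨i, List.mem_range.mpr hi, ?_⟩
    rw [gB_eq l j (by omega)]
    unfold gA
    rw [List.getD_eq_getElem l 0 hi, List.getD_eq_getElem _ 0 hj', hval]
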